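-- pv_equiv track=rewrite | github.com/nummy/exec | mi/quiz4/q4helper/q4solution.py | slice_gen
-- ===== SOURCE A (Python) =====
-- def slice_gen(iterable, start, stop, step):
--     assert (start >= 0) is True
--     assert (stop >= 0) is True
--     assert(step>0) is True
--     temp = iter(iterable)
--     count = 0
--     while True:
--         try:
--             elem = next(temp)
--             if count == start:
--                 if start < stop:
--                     start = start + step
--                     yield elem
--                 else:
--                     break
--             count += 1
--         except StopIteration as e:
--             break
-- ===== SOURCE B (Python) =====
-- def slice_gen(iterable, start, stop, step):
--     assert start >= 0 and stop >= 0 and step > 0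
--     for i, elem in enumerate(iterable):
--         if i >= stop:
--             break
--         if i >= start and (i - start) % step == 0:
--             yield elem
-- ===== Notes on version B (the rewrite author's own statement) =====
-- stated objective: simpler
-- what changed: Replaces the moving-target-index while/next/StopIteration machinery with a single for-loop over enumerate that breaks at stop and selects indices by the modular test (i - start) % step == 0.
import Mathlib
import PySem

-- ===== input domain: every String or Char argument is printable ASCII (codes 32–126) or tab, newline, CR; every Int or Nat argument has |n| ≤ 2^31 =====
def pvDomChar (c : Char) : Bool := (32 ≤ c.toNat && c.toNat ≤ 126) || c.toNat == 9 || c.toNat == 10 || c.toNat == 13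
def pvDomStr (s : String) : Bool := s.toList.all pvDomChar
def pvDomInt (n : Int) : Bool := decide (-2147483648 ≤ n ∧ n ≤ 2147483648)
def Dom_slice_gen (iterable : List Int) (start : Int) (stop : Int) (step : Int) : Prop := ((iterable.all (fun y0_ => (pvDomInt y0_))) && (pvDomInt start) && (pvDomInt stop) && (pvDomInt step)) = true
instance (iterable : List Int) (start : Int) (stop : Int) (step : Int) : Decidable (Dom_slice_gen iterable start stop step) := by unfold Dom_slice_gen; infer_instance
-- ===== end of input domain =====

-- B replaces A's while/next/StopIteration loop with a moving target index by one
-- loop over enumerate with a break at stop and a modular index test (simpler).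

-- ===== PORT A =====
-- A's while-True loop over the iterator: state = (mutable start, count); next() on an
-- empty remainder (StopIteration) breaks.
def slice_gen_go (l : List Int) (start stop step count : Int) : List Int :=
  match l with
  | [] => []
  | elem :: rest =>
    if count == start then
      if start < stop then
        elem :: slice_gen_go rest (start + step) stop step (count + 1)
      else []
    else slice_gen_go rest start stop step (count + 1)

def slice_gen (iterable : List Int) (start : Int) (stop : Int) (step : Int) : List Int :=
  slice_gen_go iterable start stop step 0

-- ===== PORT B =====
-- B's for-loop over enumerate(iterable): break at i ≥ stop, yield on the modular test.
def slice_gen_alt_go (start stop step : Int) (l : List (Int × Int)) : List Int :=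
  match l with
  | [] => []
  | (i, elem) :: rest =>
    if stop ≤ i then []
    else if start ≤ i ∧ PySem.Int.mod (i - start) step = 0 then
      elem :: slice_gen_alt_go start stop step rest
    else slice_gen_alt_go start stop step rest

def slice_gen_alt (iterable : List Int) (start : Int) (stop : Int) (step : Int) : List Int :=
  slice_gen_alt_go start stop step (PySem.List.enumerate iterable 0)

-- ===== PRECONDITION & SPEC =====
-- A's three asserts raise AssertionError unless start ≥ 0, stop ≥ 0 and step > 0.
def Pre_slice_gen (iterable : List Int) (start : Int) (stop : Int) (step : Int) : Prop :=
  0 ≤ start ∧ 0 ≤ stop ∧ 0 < step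
instance (iterable : List Int) (start : Int) (stop : Int) (step : Int) : Decidable (Pre_slice_gen iterable start stop step) := by unfold Pre_slice_gen; infer_instance

def pvWitness_slice_gen : List Int × Int × Int × Int := ([5, -3, 7, 1, 9, 2], 1, 6, 2)

def Spec_slice_gen (iterable : List Int) (start : Int) (stop : Int) (step : Int) (out : List Int) : Prop := out = slice_gen_alt iterable start stop step
instance (iterable : List Int) (start : Int) (stop : Int) (step : Int) (out : List Int) : Decidable (Spec_slice_gen iterable start stop step out) := by unfold Spec_slice_gen; infer_instance

-- ===== CLAIM (what is proved, stated in full; the proofs are below) =====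
def Claim_equal_slice_gen : Prop := ∀ (iterable : List Int) (start : Int) (stop : Int) (step : Int), Dom_slice_gen iterable start stop step → Pre_slice_gen iterable start stop step → Spec_slice_gen iterable start stop step (slice_gen iterable start stop step)

-- ===== LEMMAS AND PROOFS =====

-- Once the target index s is ≥ stop, A yields nothing more.
theorem slice_gen_go_drop (l : List Int) (s stop step : Int) (hstop : stop ≤ s) :
    ∀ c : Int, c ≤ s → slice_gen_go l s stop step c = [] := by
  induction l with
  | nil => intro c _; rfl
  | cons e rest ih =>
    intro c hcs
    simp only [slice_gen_go]
    by_cases h : c = s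
    · rw [if_pos (by simp [h])]
      rw [if_neg (by omega)]
    · rw [if_neg (by simp [h])]
      exact ih (c + 1) (by omega)

-- Main invariant: A's loop at state (target s, count c) equals B's loop over the
-- suffix of enumerate starting at index c, provided no index in [c, s) passes B's test.
theorem slice_gen_go_eq (l : List Int) (s₀ stop step : Int) (hstep : 0 < step) :
    ∀ s c : Int, c ≤ s → step ∣ (s - s₀) → s₀ ≤ s →
    (∀ i : Int, c ≤ i → i < s → s₀ ≤ i → ¬ step ∣ (i - s₀)) →
    slice_gen_go l s stop step c
      = slice_gen_alt_go s₀ stop step (PySem.List.enumerate l c) := by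
  induction l with
  | nil => intro s c _ _ _ _; simp [slice_gen_go, PySem.List.enumerate_nil, slice_gen_alt_go]
  | cons e rest ih =>
    intro s c hcs hdvd hs₀ hgap
    rw [PySem.List.enumerate_cons]
    simp only [slice_gen_go, slice_gen_alt_go]
    by_cases hstop' : stop ≤ c
    · -- B breaks; A yields nothing more either
      rw [if_pos hstop']
      by_cases h : c = s
      · rw [if_pos (by simp [h])]
        rw [if_neg (by omega)]
      · rw [if_neg (by simp [h])]
        exact slice_gen_go_drop rest s stop step (by omega) (c + 1) (by omega)
    · rw [if_neg hstop']
      by_cases h : c = s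
      · subst h
        rw [if_pos (by simp), if_pos (by omega)]
        rw [if_pos ⟨hs₀, by rw [PySem.Int.mod_eq_zero_iff_dvd]; exact hdvd⟩]
        congr 1
        refine ih (c + step) (c + 1) (by omega) ?_ (by omega) ?_
        · obtain ⟨k, hk⟩ := hdvd
          exact ⟨k + 1, by linarith⟩
        · rintro i hi1 hi2 hi3 ⟨k, hk⟩
          obtain ⟨m, hm⟩ := hdvd
          have hic : i - c = step * (k - m) := by
            have : i - c = (i - s₀) - (c - s₀) := by ring
            rw [this, hk, hm]; ring
          have h1 : 0 < i - c := by omega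
          have h2 : i - c < step := by omega
          rcases le_or_gt (k - m) 0 with hkm | hkm
          · nlinarith
          · nlinarith
      · rw [if_neg (by simp [h])]
        rw [if_neg (by
          rintro ⟨hi1, hi2⟩
          exact hgap c le_rfl (by omega) hi1 ((PySem.Int.mod_eq_zero_iff_dvd _ _).mp hi2))]
        exact ih s (c + 1) (by omega) hdvd hs₀ (fun i h1 h2 h3 => hgap i (by omega) h2 h3)

-- ===== VERDICT (by name: the statement is the Claim_ definition above) =====
theorem slice_gen_spec : Claim_equal_slice_gen := by
  intro iterable start stop step _ hpre
  obtain ⟨h1, h2, h3⟩ := hpre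
  unfold Spec_slice_gen slice_gen slice_gen_alt
  exact slice_gen_go_eq iterable start stop step h3 start 0 h1 ⟨0, by ring⟩ le_rfl
    (fun i hi1 hi2 hi3 hd => absurd hi2 (by omega))
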